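-- pv_equiv track=rewrite | github.com/the-cafe/git-ai-commit | ai_commit_msg/core/gen_commit_msg.py | truncate_diff
-- ===== SOURCE A (Python) =====
-- def truncate_diff(diff: str, max_length: int = 3000) -> str:
--     """
--     Truncate the diff to a maximum length while preserving the most recent changes.
--     """
--     if len(diff) <= max_length:
--         return diff
--
--     lines = diff.split('\n')
--     truncated_lines = []
--     current_length = 0
--
--     for line in reversed(lines):
--         if current_length + len(line) + 1 > max_length:
--             break
--         truncated_lines.append(line)
--         current_length += len(line) + 1
--
--     return '\n'.join(reversed(truncated_lines))
-- ===== SOURCE B (Python) =====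
-- def truncate_diff(diff: str, max_length: int = 3000) -> str:
--     """
--     Truncate the diff to a maximum length while preserving the most recent changes.
--     """
--     if len(diff) <= max_length:
--         return diff
--
--     lines = diff.split('\n')
--     # total budget-metric of the remaining suffix: sum of len(line)+1 == len(diff)+1
--     running = len(diff) + 1
--     cut = 0
--     while cut < len(lines) and running > max_length:
--         running -= len(lines[cut]) + 1
--         cut += 1
--
--     return '\n'.join(lines[cut:])
-- ===== Notes on version B (the rewrite author's own statement) =====
-- stated objective: alternative
-- what changed: Replaces A's reverse accumulating pass (append lines back-to-front, then reverse and join) with a forward shrinking-remainder pass: total budget len(diff)+1, advance a cut index from the front while the remaining budget exceeds max_length, then join the trailing suffix.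
import Mathlib
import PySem

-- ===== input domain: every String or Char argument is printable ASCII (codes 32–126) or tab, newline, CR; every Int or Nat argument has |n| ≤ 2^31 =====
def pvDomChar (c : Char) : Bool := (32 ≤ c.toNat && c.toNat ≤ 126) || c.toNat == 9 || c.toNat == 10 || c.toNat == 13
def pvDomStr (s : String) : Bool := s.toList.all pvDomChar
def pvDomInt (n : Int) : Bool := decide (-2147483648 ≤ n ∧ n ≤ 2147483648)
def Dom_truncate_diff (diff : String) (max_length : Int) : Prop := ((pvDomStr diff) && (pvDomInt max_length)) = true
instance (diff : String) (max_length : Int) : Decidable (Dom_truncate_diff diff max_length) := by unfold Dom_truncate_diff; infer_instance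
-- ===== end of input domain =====

-- B replaces A's reverse accumulating pass by a forward shrinking-remainder pass (running budget
-- len(diff)+1, advance a cut index while over budget, join the trailing suffix); objective: alternative.

-- ===== PORT A =====
-- the 'for line in reversed(lines): … break …' loop of A, with its accumulator and running length
def pvALoop (max_length : Int) : List (List Char) → List (List Char) → Int → List (List Char)
  | [], acc, _ => acc
  | line :: rest, acc, current_length =>
    if current_length + (line.length : Int) + 1 > max_length then acc
    else pvALoop max_length rest (acc ++ [line]) (current_length + (line.length : Int) + 1)

def truncate_diff (diff : String) (max_length : Int) : String :=
  if PySem.Str.len diff ≤ max_length then diff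
  else
    let lines := PySem.Chars.splitOn diff.toList ['\n']
    let truncated_lines := pvALoop max_length lines.reverse [] 0
    String.ofList (PySem.Chars.join ['\n'] truncated_lines.reverse)

-- ===== PORT B =====
-- the 'while cut < len(lines) and running > max_length' loop of B, returning the cut index
def pvBGo (lines : List (List Char)) (max_length : Int) (cut : Nat) (running : Int) : Nat :=
  if h : cut < lines.length ∧ running > max_length then
    pvBGo lines max_length (cut + 1) (running - (((lines.getD cut []).length : Int) + 1))
  else cut
termination_by lines.length - cut
decreasing_by omega

def truncate_diff_alt (diff : String) (max_length : Int) : String :=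
  if PySem.Str.len diff ≤ max_length then diff
  else
    let lines := PySem.Chars.splitOn diff.toList ['\n']
    let cut := pvBGo lines max_length 0 (PySem.Str.len diff + 1)
    String.ofList (PySem.Chars.join ['\n'] (PySem.List.slice lines (some (cut : Int)) none))

-- ===== PRECONDITION & SPEC =====
def Spec_truncate_diff (diff : String) (max_length : Int) (out : String) : Prop := out = truncate_diff_alt diff max_length
instance (diff : String) (max_length : Int) (out : String) : Decidable (Spec_truncate_diff diff max_length out) := by unfold Spec_truncate_diff; infer_instance

-- ===== CLAIM (what is proved, stated in full; the proofs are below) =====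
def Claim_equal_truncate_diff : Prop := ∀ (diff : String) (max_length : Int), Dom_truncate_diff diff max_length → Spec_truncate_diff diff max_length (truncate_diff diff max_length)

-- ===== LEMMAS AND PROOFS =====

-- budget metric: each line costs len(line)+1
def pvW (xs : List (List Char)) : Int := (xs.map (fun l => (l.length : Int) + 1)).sum

-- the common value of both loops: the maximal trailing suffix of weight ≤ max_length
def pvG (max_length : Int) : List (List Char) → List (List Char)
  | [] => []
  | l :: rest => if pvW (l :: rest) ≤ max_length then l :: rest else pvG max_length rest

theorem pvW_nil : pvW [] = 0 := rfl

theorem pvW_cons (l : List Char) (xs : List (List Char)) :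
    pvW (l :: xs) = ((l.length : Int) + 1) + pvW xs := by simp [pvW]

theorem pvW_nonneg (xs : List (List Char)) : 0 ≤ pvW xs := by
  induction xs with
  | nil => simp [pvW]
  | cons l rest ih => rw [pvW_cons]; positivity

theorem pvW_reverse (xs : List (List Char)) : pvW xs.reverse = pvW xs := by
  simp [pvW]

theorem pvALoop_append (max_length : Int) (xs : List (List Char)) (l : List Char)
    (acc : List (List Char)) (cur : Int) :
    pvALoop max_length (xs ++ [l]) acc cur =
      if cur + pvW xs + ((l.length : Int) + 1) ≤ max_length then acc ++ xs ++ [l]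
      else pvALoop max_length xs acc cur := by
  induction xs generalizing acc cur with
  | nil =>
    simp only [List.nil_append, pvW_nil, pvALoop]
    split_ifs with h1 h2 <;> try simp <;> omega
  | cons x xs' ih =>
    simp only [List.cons_append, pvALoop, pvW_cons]
    split_ifs with h1 h2 <;> try rfl
    · -- x alone overflows, so the whole list does too
      exact absurd h2 (by have := pvW_nonneg xs'; omega)
    · rw [ih]
      split_ifs with h3 <;> try simp <;> omega
    · rw [ih]
      split_ifs with h3 <;> try rfl
      omega

theorem pvALoop_rev (max_length : Int) (ls : List (List Char)) :
    pvALoop max_length ls.reverse [] 0 = (pvG max_length ls).reverse := by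
  induction ls with
  | nil => simp [pvALoop, pvG]
  | cons l rest ih =>
    rw [List.reverse_cons, pvALoop_append, pvW_reverse]
    simp only [pvG, pvW_cons]
    split_ifs with h1 h2 <;> try (first | simp | exact ih) <;> omega

theorem pvG_of_le (max_length : Int) (xs : List (List Char)) (h : pvW xs ≤ max_length) :
    pvG max_length xs = xs := by
  cases xs with
  | nil => rfl
  | cons l rest => simp [pvG, h]

theorem pvBGo_drop (lines : List (List Char)) (max_length : Int) (cut : Nat)
    (hc : cut ≤ lines.length) :
    lines.drop (pvBGo lines max_length cut (pvW (lines.drop cut))) =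
      pvG max_length (lines.drop cut) := by
  induction hn : lines.length - cut generalizing cut with
  | zero =>
    have hcut : cut = lines.length := by omega
    rw [pvBGo]
    have hdrop : lines.drop cut = [] := by simp [hcut]
    rw [hdrop, pvW_nil]
    split_ifs with h
    · omega
    · rw [hdrop]; rfl
  | succ n ih =>
    rw [pvBGo]
    split_ifs with h
    · have hlt : cut < lines.length := h.1
      have hdrop : lines.drop cut = lines[cut] :: lines.drop (cut + 1) :=
        (List.getElem_cons_drop hlt).symm
      have hg : lines.getD cut [] = lines[cut] := List.getD_eq_getElem lines [] hlt
      have hw : pvW (lines.drop cut) - (((lines.getD cut []).length : Int) + 1)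
          = pvW (lines.drop (cut + 1)) := by
        rw [hdrop, pvW_cons, hg]; ring
      rw [hw, ih (cut + 1) (by omega) (by omega), hdrop]
      have hgt : ¬ pvW (lines[cut] :: lines.drop (cut + 1)) ≤ max_length := by
        rw [← hdrop]; omega
      simp only [pvG]
      rw [if_neg hgt]
    · -- loop exits: either cut = len (empty suffix) or weight fits
      rcases not_and_or.mp h with h1 | h2
      · have hcut : cut = lines.length := by omega
        simp [hcut, pvG]
      · rw [pvG_of_le _ _ (by omega)]

theorem pvW_splitOn_go (fuel : Nat) (l cur : List Char) (acc : List (List Char))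
    (hf : l.length < fuel) :
    pvW (PySem.Chars.splitOn.go ['\n'] fuel l cur acc) =
      pvW acc + (cur.length : Int) + (l.length : Int) + 1 := by
  induction fuel generalizing l cur acc with
  | zero => omega
  | succ n ih =>
    rw [PySem.Chars.splitOn.go.eq_def]
    cases l with
    | nil => simp [pvW]; ring
    | cons c rest =>
      simp only []
      split_ifs with h
      · have : List.drop (['\n'].length) (c :: rest) = rest := by simp
        rw [this, ih rest [] (cur.reverse :: acc) (by simp at hf ⊢; omega)]
        rw [pvW_cons]
        simp
        ring
      · rw [ih rest (c :: cur) acc (by simp at hf ⊢; omega)]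
        simp
        ring

theorem pvW_splitOn (s : List Char) :
    pvW (PySem.Chars.splitOn s ['\n']) = (s.length : Int) + 1 := by
  rw [PySem.Chars.splitOn, pvW_splitOn_go s.length.succ s [] [] (by omega)]
  simp [pvW_nil]

-- ===== VERDICT (by name: the statement is the Claim_ definition above) =====
theorem truncate_diff_spec : Claim_equal_truncate_diff := by
  intro diff max_length _
  unfold Spec_truncate_diff truncate_diff truncate_diff_alt
  split_ifs with h
  · rfl
  · simp only []
    congr 1
    rw [PySem.List.slice_from_natCast]
    have hrun : PySem.Str.len diff + 1 = pvW (PySem.Chars.splitOn diff.toList ['\n']) := by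
      rw [pvW_splitOn, PySem.Str.len]
    rw [hrun]
    have := pvBGo_drop (PySem.Chars.splitOn diff.toList ['\n']) max_length 0 (by omega)
    simp only [List.drop_zero] at this
    rw [this, pvALoop_rev, List.reverse_reverse]
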